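-- pv_equiv track=rewrite | github.com/Romansko/Foobar | level2/LovelyLuckyLAMBs/solution.py | generous
-- ===== SOURCE A (Python) =====
-- def generous(total_lambs):
--     """ pay lambs generously. return payroll. assume total_lambs > 0. """
--     payroll = []
--     i = 0
--     while True:   # main 2^i series construction loop
--         lambs = pow(2, i)
--         if lambs > total_lambs:
--             break
--         payroll.append(lambs)
--         total_lambs -= lambs
--         i += 1
--     return payroll
-- ===== SOURCE B (Python) =====
-- def generous(total_lambs):
--     """ pay lambs generously. return payroll. assume total_lambs > 0. """
--     if total_lambs <= 0:
--         return []
--     k = (total_lambs + 1).bit_length() - 1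
--     return [1 << j for j in range(k)]
-- ===== Notes on version B (the rewrite author's own statement) =====
-- stated objective: simpler
-- what changed: Replaces A's subtract-until-exhausted while loop with a closed form: the number of payroll terms is derived directly from the bit length of the incremented total, and the payroll is built as the corresponding powers of two over a range, with no running balance and no per-power comparison.
import Mathlib
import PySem

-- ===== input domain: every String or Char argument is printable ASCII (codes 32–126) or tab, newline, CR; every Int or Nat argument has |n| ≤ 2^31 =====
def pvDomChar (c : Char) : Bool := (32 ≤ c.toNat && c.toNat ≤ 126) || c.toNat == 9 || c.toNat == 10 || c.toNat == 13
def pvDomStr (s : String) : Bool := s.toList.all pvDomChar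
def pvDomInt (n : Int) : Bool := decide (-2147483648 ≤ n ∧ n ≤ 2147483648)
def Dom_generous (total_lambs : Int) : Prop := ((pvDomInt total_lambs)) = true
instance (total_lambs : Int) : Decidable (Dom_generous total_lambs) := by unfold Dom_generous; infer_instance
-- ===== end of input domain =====

-- B computes the number of payroll terms in closed form instead of A's subtract-until-exhausted loop; objective: simpler.

-- ===== PORT A =====
-- the 'while True' loop of A, with state (total_lambs, i, payroll); breaks when 2^i > total_lambs
def generousLoop (total_lambs : Int) (i : Nat) (payroll : List Int) : List Int :=
  let lambs : Int := 2 ^ i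
  if lambs > total_lambs then payroll
  else generousLoop (total_lambs - lambs) (i + 1) (payroll ++ [lambs])
termination_by total_lambs.toNat
decreasing_by
  have h1 : (1 : Int) ≤ 2 ^ i := one_le_pow₀ (by norm_num)
  omega

def generous (total_lambs : Int) : List Int :=
  generousLoop total_lambs 0 []

-- ===== PORT B =====
-- (total_lambs + 1).bit_length() - 1 for total_lambs ≥ 1 equals Nat.log2 (total_lambs + 1).toNat
def generous_alt (total_lambs : Int) : List Int :=
  if total_lambs ≤ 0 then []
  else (List.range (Nat.log2 (total_lambs + 1).toNat)).map (fun j => (2 : Int) ^ j)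

-- ===== PRECONDITION & SPEC =====
def Spec_generous (total_lambs : Int) (out : List Int) : Prop := out = generous_alt total_lambs
instance (total_lambs : Int) (out : List Int) : Decidable (Spec_generous total_lambs out) := by unfold Spec_generous; infer_instance

-- ===== CLAIM (what is proved, stated in full; the proofs are below) =====
def Claim_equal_generous : Prop := ∀ (total_lambs : Int), Dom_generous total_lambs → Spec_generous total_lambs (generous total_lambs)

-- ===== LEMMAS AND PROOFS =====

-- The loop appends exactly m terms 2^i, …, 2^(i+m-1), where m is pinned by
-- 2^i * (2^m - 1) ≤ total < 2^i * (2^(m+1) - 1).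
theorem generousLoop_eq (m : Nat) :
    ∀ (total : Int) (i : Nat) (acc : List Int),
      (2 : Int) ^ i * (2 ^ m - 1) ≤ total →
      total < (2 : Int) ^ i * (2 ^ (m + 1) - 1) →
      generousLoop total i acc = acc ++ (List.range m).map (fun j => (2 : Int) ^ (i + j)) := by
  induction m with
  | zero =>
    intro total i acc hlo hhi
    rw [generousLoop]
    simp only [List.range_zero, List.map_nil, List.append_nil]
    have : total < 2 ^ i := by
      have := hhi
      simp at this
      linarith [this]
    simp [this]
  | succ m ih =>
    intro total i acc hlo hhi
    have hp : (1 : Int) ≤ 2 ^ i := one_le_pow₀ (by norm_num)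
    have hm : (1 : Int) ≤ 2 ^ (m + 1) - 1 := by
      have : (2 : Int) ^ 1 ≤ 2 ^ (m + 1) := by
        apply pow_le_pow_right₀ <;> omega
      simp at this; omega
    have hstep : (2 : Int) ^ i ≤ total := by
      calc (2 : Int) ^ i = 2 ^ i * 1 := by ring
        _ ≤ 2 ^ i * (2 ^ (m + 1) - 1) := by
            apply mul_le_mul_of_nonneg_left hm (by positivity)
        _ ≤ total := hlo
    rw [generousLoop]
    simp only [not_lt.mpr hstep, if_false]
    rw [ih (total - 2 ^ i) (i + 1) (acc ++ [2 ^ i])]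
    · rw [List.range_succ_eq_map, List.append_assoc]
      simp only [List.map_cons, List.map_map, List.singleton_append, Nat.add_zero,
        Function.comp_def, Nat.succ_eq_add_one]
      have hmap : ∀ j ∈ List.range m, (2 : Int) ^ (i + 1 + j) = 2 ^ (i + (j + 1)) :=
        fun j _ => by congr 1; omega
      rw [List.map_congr_left hmap]
    · have : (2 : Int) ^ (i + 1) * (2 ^ m - 1) = 2 ^ i * (2 ^ (m + 1) - 1) - 2 ^ i := by
        rw [pow_succ, pow_succ]; ring
      rw [this]; omega
    · have : (2 : Int) ^ (i + 1) * (2 ^ (m + 1) - 1) = 2 ^ i * (2 ^ (m + 1 + 1) - 1) - 2 ^ i := by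
        rw [pow_succ, pow_succ]; ring
      rw [this]; omega

-- ===== VERDICT (by name: the statement is the Claim_ definition above) =====
theorem generous_spec : Claim_equal_generous := by
  intro total _
  unfold Spec_generous generous generous_alt
  by_cases h : total ≤ 0
  · rw [generousLoop]
    simp [h]
    omega
  · simp only [if_neg h]
    replace h : 0 < total := by omega
    set n : Nat := (total + 1).toNat with hn
    have hn1 : 2 ≤ n := by omega
    have hne : n ≠ 0 := by omega
    have hlo : 2 ^ Nat.log2 n ≤ n := Nat.log2_self_le hne
    have hhi : n < 2 ^ (Nat.log2 n + 1) := Nat.lt_log2_self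
    have := generousLoop_eq (Nat.log2 n) total 0 []
    simp only [pow_zero, one_mul, List.nil_append] at this
    rw [this]
    · apply List.map_congr_left; intro j _; simp
    · have : ((2 : Int) ^ Nat.log2 n) ≤ total + 1 := by
        calc ((2 : Int) ^ Nat.log2 n) = ((2 ^ Nat.log2 n : Nat) : Int) := by push_cast; ring
          _ ≤ (n : Int) := by exact_mod_cast hlo
          _ = total + 1 := by omega
      omega
    · have : total + 1 < (2 : Int) ^ (Nat.log2 n + 1) := by
        calc total + 1 = (n : Int) := by omega
          _ < ((2 ^ (Nat.log2 n + 1) : Nat) : Int) := by exact_mod_cast hhi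
          _ = (2 : Int) ^ (Nat.log2 n + 1) := by push_cast; ring
      omega
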